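-- pv_equiv track=rewrite | github.com/ronit450/Habib-University-Semester2-DSA-Programs | LAb2/Quiz Integral_image.py | integral_image
-- ===== SOURCE A (Python) =====
-- def integral_image(A):
--     integral_image = [[0 for i in range(len(A[0]))] for j in range(len(A))]
--     for i in range(len(A)):
--         for j in range(len(A[0])):
--             temp = 0
--             if i == 0 and j == 0:
--                 temp = A[i][j]
--             elif i == 0 and j > 0:
--                 temp_for_column = j
--                 while temp_for_column != -1:
--                     temp += A[i][temp_for_column]
--                     temp_for_column -= 1
--             elif i > 0 and j == 0:
--                 temp_for_row = i
--                 while temp_for_row != -1: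
--                     temp += A[temp_for_row][j]
--                     temp_for_row -= 1
--             elif i > 0 and j > 0:
--                 temp_for_row = i
--                 temp_for_column = j
--                 while temp_for_row != -1:
--                     while temp_for_column != -1:
--                         temp += A[temp_for_row][temp_for_column]
--                         temp_for_column -= 1
--                     temp_for_column = j
--                     temp_for_row -= 1
--             integral_image[i][j] = temp
--     return integral_image
-- ===== SOURCE B (Python) =====
-- def integral_image(A):
--     w = len(A[0])
--     result = []
--     prev = [0] * w
--     for row in A:
--         cur = []
--         run = 0
--         for j in range(w):
--             run += row[j]
--             cur.append(run + prev[j])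
--         result.append(cur)
--         prev = cur
--     return result
-- ===== Notes on version B (the rewrite author's own statement) =====
-- stated objective: faster
-- what changed: Replaced the per-cell rectangle re-summation (nested while loops over the whole prefix rectangle for every output cell) with a single-pass summed-area-table recurrence: a row-local running sum plus the previous output row.
-- outside the precondition, e.g. on integral_image([]): A returns [], B raises IndexError
import Mathlib
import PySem

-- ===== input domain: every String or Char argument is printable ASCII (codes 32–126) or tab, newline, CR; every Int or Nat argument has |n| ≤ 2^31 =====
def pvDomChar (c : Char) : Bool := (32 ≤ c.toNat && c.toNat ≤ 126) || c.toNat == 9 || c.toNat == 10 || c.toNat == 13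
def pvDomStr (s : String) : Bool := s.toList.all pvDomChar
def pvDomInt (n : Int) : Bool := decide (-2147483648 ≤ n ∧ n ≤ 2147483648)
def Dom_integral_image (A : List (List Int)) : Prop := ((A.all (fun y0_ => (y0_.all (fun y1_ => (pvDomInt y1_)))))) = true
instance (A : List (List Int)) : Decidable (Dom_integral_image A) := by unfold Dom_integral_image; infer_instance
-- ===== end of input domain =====

-- B replaces A's per-cell rectangle re-summation with a single-pass summed-area-table
-- recurrence (row running sum + previous output row): O(n*m) instead of O(n^2*m^2).


-- ===== PORT A =====
-- the inner 'while temp_for_column != -1' loop: temp = row[j] + row[j-1] + … + row[0]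
-- (Pre_ keeps every index in range, so List.getD never takes its default)
def whileColSum (row : List Int) : Nat → Int
  | 0 => row.getD 0 0
  | j+1 => row.getD (j+1) 0 + whileColSum row j

-- the 'while temp_for_row != -1' loop of the j = 0 branch: A[i][0] + … + A[0][0]
def whileRowSum (A : List (List Int)) : Nat → Int
  | 0 => (A.getD 0 []).getD 0 0
  | i+1 => (A.getD (i+1) []).getD 0 0 + whileRowSum A i

-- the nested while loops of the i > 0, j > 0 branch
def whileRect (A : List (List Int)) (i j : Nat) : Int :=
  match i with
  | 0 => whileColSum (A.getD 0 []) j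
  | i+1 => whileColSum (A.getD (i+1) []) j + whileRect A i j

def integral_image (A : List (List Int)) : List (List Int) :=
  let n := A.length
  let m := (A.getD 0 []).length
  (List.range n).map (fun i =>
    (List.range m).map (fun j =>
      if i = 0 ∧ j = 0 then (A.getD i []).getD j 0
      else if i = 0 ∧ j > 0 then whileColSum (A.getD i []) j
      else if i > 0 ∧ j = 0 then whileRowSum A i
      else whileRect A i j))

-- ===== PORT B =====
-- the inner 'for j in range(w)' loop of Source B, state = (run, cur)
def rowScan (row prev : List Int) (w : Nat) : List Int :=
  ((List.range w).foldl (fun (s : Int × List Int) j =>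
      let run := s.1 + row.getD j 0
      (run, s.2 ++ [run + prev.getD j 0])) (0, ([] : List Int))).2

def integral_image_alt (A : List (List Int)) : List (List Int) :=
  (A.foldl (fun (s : List Int × List (List Int)) row =>
      let cur := rowScan row s.1 (A.getD 0 []).length
      (cur, s.2 ++ [cur]))
    (List.replicate (A.getD 0 []).length 0, ([] : List (List Int)))).2

-- ===== PRECONDITION & SPEC =====
-- Pre_ excludes the empty list, on which A's empty comprehension happens to return [] while
-- any len(A[0])-based implementation (B included) raises IndexError, and inputs with a row
-- shorter than row 0, on which A itself raises IndexError at A[i][j].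
def Pre_integral_image (A : List (List Int)) : Prop :=
  A ≠ [] ∧ ∀ row ∈ A, (A.getD 0 []).length ≤ row.length
instance (A : List (List Int)) : Decidable (Pre_integral_image A) := by
  unfold Pre_integral_image; infer_instance
def pvWitness_integral_image : List (List Int) := [[1, 2], [3, 4]]
def Spec_integral_image (A : List (List Int)) (out : List (List Int)) : Prop := out = integral_image_alt A
instance (A : List (List Int)) (out : List (List Int)) : Decidable (Spec_integral_image A out) := by unfold Spec_integral_image; infer_instance

-- ===== CLAIM (what is proved, stated in full; the proofs are below) =====
def Claim_equal_integral_image : Prop := ∀ (A : List (List Int)), Dom_integral_image A → Pre_integral_image A → Spec_integral_image A (integral_image A)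

-- ===== LEMMAS AND PROOFS =====

-- row prefix sum in left-to-right order: row[0] + … + row[w-1]
def sRun (row : List Int) : Nat → Int
  | 0 => 0
  | w+1 => sRun row w + row.getD w 0

-- column-prefix of the first k row prefix sums
def RA (A : List (List Int)) : Nat → Nat → Int
  | 0, _ => 0
  | k+1, j => RA A k j + sRun (A.getD k []) (j+1)

theorem whileColSum_eq_sRun (row : List Int) (j : Nat) :
    whileColSum row j = sRun row (j+1) := by
  induction j with
  | zero => simp [whileColSum, sRun]
  | succ j ih => simp [whileColSum, sRun, ih]; ring

theorem whileRowSum_eq_rect (A : List (List Int)) (i : Nat) :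
    whileRowSum A i = whileRect A i 0 := by
  induction i with
  | zero => simp [whileRowSum, whileRect, whileColSum]
  | succ i ih => simp [whileRowSum, whileRect, whileColSum, ih]

theorem whileRect_eq_RA (A : List (List Int)) (i j : Nat) :
    whileRect A i j = RA A (i+1) j := by
  induction i with
  | zero => simp [whileRect, RA, whileColSum_eq_sRun]
  | succ i ih => simp [whileRect, RA, whileColSum_eq_sRun, ih]; ring

-- A's port in closed form
theorem integral_image_closed (A : List (List Int)) :
    integral_image A = (List.range A.length).map (fun i =>
      (List.range (A.getD 0 []).length).map (fun j => RA A (i+1) j)) := by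
  unfold integral_image
  refine List.map_congr_left (fun i _ => List.map_congr_left (fun j _ => ?_))
  rcases i with _ | i <;> rcases j with _ | j <;>
    simp [whileColSum_eq_sRun, whileRowSum_eq_rect, whileRect_eq_RA, RA, sRun, whileRect,
      whileColSum] <;> ring

-- the inner fold of B, with run generalized
theorem rowScan_fold (row prev : List Int) (w : Nat) :
    (List.range w).foldl (fun (s : Int × List Int) j =>
        let run := s.1 + row.getD j 0
        (run, s.2 ++ [run + prev.getD j 0])) (0, ([] : List Int))
      = (sRun row w, (List.range w).map (fun j => sRun row (j+1) + prev.getD j 0)) := by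
  induction w with
  | zero => simp [sRun]
  | succ w ih =>
    rw [List.range_succ, List.foldl_append, ih]
    simp [sRun]

theorem rowScan_eq (row prev : List Int) (w : Nat) :
    rowScan row prev w = (List.range w).map (fun j => sRun row (j+1) + prev.getD j 0) := by
  unfold rowScan; rw [rowScan_fold]

theorem getD_map_range (g : Nat → Int) (w j : Nat) (hj : j < w) :
    ((List.range w).map g).getD j 0 = g j := by
  rw [List.getD_eq_getElem?_getD, List.getElem?_map, List.getElem?_range hj]
  rfl

-- one step of B's outer fold, when prev is the RA row
theorem rowScan_RA (A : List (List Int)) (k w : Nat) :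
    rowScan (A.getD k []) ((List.range w).map (fun j => RA A k j)) w
      = (List.range w).map (fun j => RA A (k+1) j) := by
  rw [rowScan_eq]
  refine List.map_congr_left (fun j hj => ?_)
  rw [getD_map_range _ _ _ (List.mem_range.mp hj)]
  simp [RA]; ring

-- unrolling B's outer fold over a suffix of A
theorem foldB_spec (w : Nat) (A : List (List Int)) :
    ∀ (n k : Nat), n = A.length - k →
    ∀ (acc : List (List Int)),
      ((A.drop k).foldl (fun (s : List Int × List (List Int)) row =>
          let cur := rowScan row s.1 w
          (cur, s.2 ++ [cur])) ((List.range w).map (fun j => RA A k j), acc)).2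
        = acc ++ (List.range n).map (fun i =>
            (List.range w).map (fun j => RA A (k+i+1) j)) := by
  intro n
  induction n with
  | zero =>
    intro k hk acc
    have : A.drop k = [] := List.drop_eq_nil_of_le (by omega)
    simp [this]
  | succ n ih =>
    intro k hk acc
    have hklt : k < A.length := by omega
    have hdrop : A.drop k = A.getD k [] :: A.drop (k+1) := by
      rw [List.getD_eq_getElem?_getD, List.getElem?_eq_getElem hklt]
      simp
    rw [hdrop]
    simp only [List.foldl_cons]
    rw [show (rowScan (A.getD k []) ((List.range w).map (fun j => RA A k j)) w)
        = (List.range w).map (fun j => RA A (k+1) j) from rowScan_RA A k w]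
    rw [ih (k+1) (by omega) _]
    rw [List.range_succ_eq_map]
    simp [List.map_map, Function.comp]
    intro i _ j _
    have h : k + 1 + i + 1 = k + (i + 1) + 1 := by omega
    rw [h]

theorem integral_image_alt_closed (A : List (List Int)) :
    integral_image_alt A = (List.range A.length).map (fun i =>
      (List.range (A.getD 0 []).length).map (fun j => RA A (i+1) j)) := by
  unfold integral_image_alt
  have h0 : (List.replicate ((A.getD 0 []).length) (0 : Int))
      = (List.range (A.getD 0 []).length).map (fun j => RA A 0 j) := by
    simp [RA]
  rw [h0]
  have := foldB_spec ((A.getD 0 []).length) A A.length 0 (by omega) []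
  simp only [List.drop_zero] at this
  rw [this]
  simp

-- ===== VERDICT (by name: the statement is the Claim_ definition above) =====
theorem integral_image_spec : Claim_equal_integral_image := by
  intro A _ _
  unfold Spec_integral_image
  rw [integral_image_closed, integral_image_alt_closed]
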